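-- pv_equiv track=rewrite | github.com/jihwan9675/codetest | level3/최고의 집합.py | solution
-- ===== SOURCE A (Python) =====
-- def solution(n, s):
--     if n>s:
--         return [-1]
--     ls =[]
--     for i in range(n):
--         if (s//n)* n != s:
--             ls.append(s//n+1)
--         else:
--             ls.append(s//n)
--         s=s-ls[-1]
--         n-=1
--     return sorted(ls)
-- ===== SOURCE B (Python) =====
-- def solution(n, s):
--     # closed form: balanced partition of s into n parts
--     if n > s:
--         return [-1]
--     if n <= 0:
--         return []
--     q, r = divmod(s, n)
--     return [q] * (n - r) + [q + 1] * r
-- ===== Notes on version B (the rewrite author's own statement) =====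
-- stated objective: faster
-- what changed: Replaces the n-step greedy loop plus final sort by a closed-form construction: one divmod gives q=s//n, r=s%n and the answer is (n-r) copies of q followed by r copies of q+1.
import Mathlib
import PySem

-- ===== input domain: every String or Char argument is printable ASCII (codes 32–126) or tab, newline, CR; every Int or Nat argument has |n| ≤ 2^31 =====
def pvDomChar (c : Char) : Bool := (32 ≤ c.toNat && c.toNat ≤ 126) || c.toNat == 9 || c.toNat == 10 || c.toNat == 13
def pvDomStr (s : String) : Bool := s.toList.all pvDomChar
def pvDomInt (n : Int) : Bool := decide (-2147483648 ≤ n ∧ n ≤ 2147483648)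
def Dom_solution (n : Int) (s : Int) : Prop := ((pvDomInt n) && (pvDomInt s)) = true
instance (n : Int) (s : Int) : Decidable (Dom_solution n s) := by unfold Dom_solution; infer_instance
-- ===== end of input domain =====

-- B replaces A's n-step greedy loop plus final sort by a closed-form construction from one divmod (objective: faster).

-- ===== PORT A =====
-- one iteration of A's loop body: append the current share, subtract it from s, decrement n
def stepA (st : List Int × Int × Int) : List Int × Int × Int :=
  match st with
  | (ls, s, n) =>
    let v := if (PySem.Int.floordiv s n) * n ≠ s then PySem.Int.floordiv s n + 1
             else PySem.Int.floordiv s n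
    (ls ++ [v], s - v, n - 1)

def solution (n : Int) (s : Int) : List Int :=
  if n > s then [-1]
  else
    let res := (PySem.List.pyRange 0 n 1).foldl (fun st _ => stepA st) ([], s, n)
    PySem.List.sorted res.1 (fun x => x) false

-- ===== PORT B =====
-- divmod(s, n) ported as floordiv/mod (n > 0 on this branch); [x]*k is List.replicate k.toNat x
def solution_alt (n : Int) (s : Int) : List Int :=
  if n > s then [-1]
  else if n ≤ 0 then []
  else
    let q := PySem.Int.floordiv s n
    let r := PySem.Int.mod s n
    List.replicate (n - r).toNat q ++ List.replicate r.toNat (q + 1)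

-- ===== PRECONDITION & SPEC =====
def Spec_solution (n : Int) (s : Int) (out : List Int) : Prop := out = solution_alt n s
instance (n : Int) (s : Int) (out : List Int) : Decidable (Spec_solution n s out) := by unfold Spec_solution; infer_instance

-- ===== CLAIM (what is proved, stated in full; the proofs are below) =====
def Claim_equal_solution : Prop := ∀ (n : Int) (s : Int), Dom_solution n s → Spec_solution n s (solution n s)

-- ===== LEMMAS AND PROOFS =====

-- a fold whose function ignores the list elements is an iterate
theorem foldl_ignore {α σ : Type} (f : σ → σ) : ∀ (l : List α) (acc : σ),
    l.foldl (fun st _ => f st) acc = f^[l.length] acc := by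
  intro l
  induction l with
  | nil => intro acc; rfl
  | cons x xs ih =>
    intro acc
    simp [List.foldl, ih, Function.iterate_succ_apply]

-- invariant of A's loop: with k iterations left and k ≤ s, the appended shares are
-- r copies of q+1 followed by k-r copies of q, where q = s//k, r = s%k
theorem loop_inv : ∀ (k : Nat) (s : Int) (acc : List Int), 1 ≤ k → (k : Int) ≤ s →
    (stepA^[k] (acc, s, (k : Int))).1 =
      acc ++ List.replicate (PySem.Int.mod s k).toNat (PySem.Int.floordiv s k + 1)
          ++ List.replicate ((k : Int) - PySem.Int.mod s k).toNat (PySem.Int.floordiv s k) := by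
  intro k
  induction k with
  | zero => intro s acc h; omega
  | succ k ih =>
    intro s acc _ hs
    rw [PySem.Int.floordiv_eq_ediv_of_pos (by push_cast; omega),
        PySem.Int.mod_eq_emod_of_pos (by push_cast; omega)]
    push_cast
    push_cast at hs
    obtain ⟨q, r, hq, hr⟩ : ∃ q r, s / ((k:Int)+1) = q ∧ s % ((k:Int)+1) = r := ⟨_, _, rfl, rfl⟩
    have hdm : ((k:Int)+1) * q + r = s := by
      rw [← hq, ← hr]; exact Int.mul_ediv_add_emod s _
    have hr0 : 0 ≤ r := hr ▸ Int.emod_nonneg s (by omega)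
    have hrlt : r < (k:Int)+1 := hr ▸ Int.emod_lt_of_pos s (by omega)
    have hexp : ((k:Int)+1)*q = (k:Int)*q + q := by ring
    have hq1 : 1 ≤ q := by
      by_contra h
      have hle : ((k:Int)+1) * q ≤ 0 :=
        mul_nonpos_of_nonneg_of_nonpos (by omega) (by omega)
      omega
    have hkq : (k:Int) * 1 ≤ (k:Int) * q := mul_le_mul_of_nonneg_left hq1 (by omega)
    rw [Int.mul_one] at hkq
    rw [hq, hr, Function.iterate_succ_apply]
    have hstep : stepA (acc, s, (k:Int)+1) =
        (acc ++ [if r = 0 then q else q+1], s - (if r = 0 then q else q+1), (k:Int)) := by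
      simp only [stepA,
        PySem.Int.floordiv_eq_ediv_of_pos (by omega : (0:Int) < (k:Int)+1), hq]
      rcases eq_or_ne r 0 with h0 | h0
      · have h' : q * ((k:Int)+1) = s := by
          have : q * ((k:Int)+1) = ((k:Int)+1) * q := by ring
          omega
        rw [if_pos h0]
        simp [h']
      · have h' : q * ((k:Int)+1) ≠ s := by
          have : q * ((k:Int)+1) = ((k:Int)+1) * q := by ring
          omega
        rw [if_neg h0]
        simp [h']
    rw [hstep]
    rcases eq_or_ne r 0 with h0 | h0
    · -- exact division: all remaining shares are q
      subst h0
      rw [if_pos rfl]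
      rcases Nat.eq_zero_or_pos k with hk0 | hk1
      · subst hk0
        simp only [Function.iterate_zero, id, Nat.cast_zero]
        simp
      · have hs' : (k:Int) ≤ s - q := by omega
        have ih' := ih (s - q) (acc ++ [q]) hk1 hs'
        have hk1' : (0:Int) < (k:Int) := by exact_mod_cast hk1
        rw [PySem.Int.floordiv_eq_ediv_of_pos hk1',
            PySem.Int.mod_eq_emod_of_pos hk1'] at ih'
        have hdq : (s - q) / (k:Int) = q ∧ (s - q) % (k:Int) = 0 :=
          (Int.ediv_emod_unique hk1').mpr ⟨by omega, le_refl 0, hk1'⟩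
        rw [ih', hdq.1, hdq.2]
        simp [List.replicate_succ, List.append_assoc]
    · -- inexact division: one share of q+1 now, then the rest
      rw [if_neg h0]
      have hk1 : 1 ≤ k := by
        rcases Nat.eq_zero_or_pos k with hk0 | hk1
        · subst hk0; omega
        · exact hk1
      have hk1' : (0:Int) < (k:Int) := by exact_mod_cast hk1
      have hs' : (k:Int) ≤ s - (q + 1) := by omega
      have ih' := ih (s - (q + 1)) (acc ++ [q + 1]) hk1 hs'
      rw [PySem.Int.floordiv_eq_ediv_of_pos hk1',
          PySem.Int.mod_eq_emod_of_pos hk1'] at ih'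
      have hdq : (s - (q + 1)) / (k:Int) = q ∧ (s - (q + 1)) % (k:Int) = r - 1 :=
        (Int.ediv_emod_unique hk1').mpr ⟨by omega, by omega, by omega⟩
      rw [ih', hdq.1, hdq.2]
      have e1 : r.toNat = (r - 1).toNat + 1 := by omega
      have e2 : ((k:Int) + 1 - r) = ((k:Int) - (r - 1)) := by ring
      rw [e1, e2, List.replicate_succ]
      simp [List.append_assoc]

-- the unsorted share list is already a permutation of B's output, with B's output ordered
theorem main_pos (n s : Int) (hn : 1 ≤ n) (hs : n ≤ s) :
    solution n s = solution_alt n s := by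
  have hk : ((n.toNat : Int)) = n := by omega
  unfold solution solution_alt
  rw [if_neg (by omega), if_neg (by omega), if_neg (by omega)]
  have h0 : (n - 0).toNat = n.toNat := by omega
  have hinv := loop_inv n.toNat s [] (by omega) (by omega)
  rw [hk] at hinv
  simp only [foldl_ignore, PySem.List.length_pyRange_one, h0, hinv]
  set q := PySem.Int.floordiv s n with hq
  set r := PySem.Int.mod s n with hr
  have hr0 : 0 ≤ r := PySem.Int.mod_nonneg (a := s) (by omega : (0:Int) < n)
  have hrn : r < n := PySem.Int.mod_lt (a := s) (by omega : (0:Int) < n)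
  apply PySem.List.sorted_id_eq_of_perm_of_pairwise
  · simpa using (List.perm_append_comm
      (l₁ := List.replicate (n - r).toNat q) (l₂ := List.replicate r.toNat (q + 1)))
  · rw [List.pairwise_append]
    refine ⟨List.pairwise_replicate.2 (by omega), List.pairwise_replicate.2 (by omega), ?_⟩
    intro a ha b hb
    rw [List.eq_of_mem_replicate ha, List.eq_of_mem_replicate hb]
    omega

-- ===== VERDICT (by name: the statement is the Claim_ definition above) =====
theorem solution_spec : Claim_equal_solution := by
  intro n s _
  unfold Spec_solution
  by_cases h1 : n > s
  · unfold solution solution_alt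
    rw [if_pos h1, if_pos h1]
  · by_cases h2 : n ≤ 0
    · unfold solution solution_alt
      rw [if_neg h1, if_neg h1, if_pos h2]
      rw [PySem.List.pyRange_one_eq_nil (by omega)]
      rfl
    · exact main_pos n s (by omega) (by omega)
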